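-- pv_equiv track=rewrite | github.com/Neuroinflab/stdp_adrenergic_project | analiza.py | get_spines
-- ===== SOURCE A (Python) =====
-- def get_spines(regions):
--     out = {}
--     for region in regions:
--         try:
--             end = region.split("_")[1]
--         except IndexError:
--             continue
--         if end == "":
--             continue
--
--         if end in out:
--             out[end].append(region)
--         else:
--             out[end] = [region]
--     return out
-- ===== SOURCE B (Python) =====
-- def _suffix(region):
--     parts = region.split("_")
--     if len(parts) > 1 and parts[1] != "":
--         return parts[1]
--     return None
--
--
-- def get_spines(regions):
--     tagged = [(s, r) for r in regions if (s := _suffix(r)) is not None]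
--     keys = list(dict.fromkeys(s for s, _ in tagged))
--     return {k: [r for s, r in tagged if s == k] for k in keys}
-- ===== Notes on version B (the rewrite author's own statement) =====
-- stated objective: alternative
-- what changed: Replaces the single-pass grow-a-dict-with-append loop by a tag/dedup/gather pipeline: build (suffix, region) pairs once, dedup the suffixes in first-occurrence order, then build each group by filtering the tagged list.
import Mathlib
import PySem

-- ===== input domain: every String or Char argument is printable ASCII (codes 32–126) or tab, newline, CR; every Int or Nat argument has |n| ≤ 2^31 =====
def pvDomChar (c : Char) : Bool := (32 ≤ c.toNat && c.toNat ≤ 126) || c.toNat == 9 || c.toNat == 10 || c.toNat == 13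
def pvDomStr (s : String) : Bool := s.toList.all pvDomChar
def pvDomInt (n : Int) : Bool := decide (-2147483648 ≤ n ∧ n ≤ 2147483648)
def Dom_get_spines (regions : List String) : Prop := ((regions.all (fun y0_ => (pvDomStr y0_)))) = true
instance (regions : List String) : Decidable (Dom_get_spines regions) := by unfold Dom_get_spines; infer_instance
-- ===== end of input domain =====

-- B is an alternative decomposition (tag, dedup keys, gather groups by filtering); equal return value, no mutation.

-- ===== PORT A =====
-- region.split("_"): split? is none only for sep = "", so the getD is exact here
def pvParts (region : String) : List String := (PySem.Str.split? region "_").getD []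

def get_spines (regions : List String) : List (String × List String) :=
  (regions.foldl (fun out region =>
    match PySem.List.pyGet? (pvParts region) 1 with
    | none => out
    | some e =>
      if e = "" then out
      else if out.contains e then out.insert e (out.getD e [] ++ [region])
      else out.insert e [region]) (PySem.Dict.empty : PySem.Dict String (List String))).items

-- ===== PORT B =====
def pvSuffix (region : String) : Option String :=
  let parts := pvParts region
  if h : 1 < parts.length then
    if parts[1] = "" then none else some parts[1]
  else none

def get_spines_alt (regions : List String) : List (String × List String) :=
  let tagged := regions.filterMap (fun r => (pvSuffix r).map (fun s => (s, r)))
  let keys := PySem.List.dedup (tagged.map (·.1))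
  keys.map (fun k => (k, (tagged.filter (fun p => p.1 == k)).map (·.2)))

-- ===== PRECONDITION & SPEC =====
def Spec_get_spines (regions : List String) (out : List (String × List String)) : Prop := out = get_spines_alt regions
instance (regions : List String) (out : List (String × List String)) : Decidable (Spec_get_spines regions out) := by unfold Spec_get_spines; infer_instance

-- ===== CLAIM (what is proved, stated in full; the proofs are below) =====
def Claim_equal_get_spines : Prop := ∀ (regions : List String), Dom_get_spines regions → Spec_get_spines regions (get_spines regions)

-- ===== LEMMAS AND PROOFS =====

-- A's per-region step is the grouping `modify` step on the tagged pair, skipped when pvSuffix is none.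
theorem step_eq_modify (out : PySem.Dict String (List String)) (region : String) :
    (match PySem.List.pyGet? (pvParts region) 1 with
      | none => out
      | some e =>
        if e = "" then out
        else if out.contains e then out.insert e (out.getD e [] ++ [region])
        else out.insert e [region]) =
    (match pvSuffix region with
      | none => out
      | some e => out.modify e [] (· ++ [region])) := by
  unfold pvSuffix
  cases parts : pvParts region with
  | nil => simp [PySem.List.pyGet?, PySem.List.pyIdx?]
  | cons a t =>
    cases t with
    | nil => simp [PySem.List.pyGet?, PySem.List.pyIdx?]
    | cons b t' =>
      have hget : PySem.List.pyGet? (a :: b :: t') 1 = some b := by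
        simp [PySem.List.pyGet?, PySem.List.pyIdx?]
      rw [hget]
      simp only [List.length_cons, dif_pos (show 1 < t'.length + 1 + 1 by omega),
        List.getElem_cons_succ, List.getElem_cons_zero]
      by_cases hb : b = ""
      · simp [hb]
      · simp only [if_neg hb]
        by_cases hc : out.contains b
        · simp [hc, PySem.Dict.modify, PySem.Dict.getD_eq_get?_getD]
        · have hc' : out.contains b = false := by simpa using hc
          simp [hc, PySem.Dict.modify, PySem.Dict.getD_of_not_contains (d := out) (k := b) (d0 := ([] : List String)) hc']

-- the A-fold over regions is the modify-fold over the tagged pairs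
theorem fold_eq_tagged (regions : List String) (d : PySem.Dict String (List String)) :
    regions.foldl (fun out region =>
      match PySem.List.pyGet? (pvParts region) 1 with
      | none => out
      | some e =>
        if e = "" then out
        else if out.contains e then out.insert e (out.getD e [] ++ [region])
        else out.insert e [region]) d =
    (regions.filterMap (fun r => (pvSuffix r).map (fun s => (s, r)))).foldl
      (fun out p => out.modify p.1 [] (· ++ [p.2])) d := by
  induction regions generalizing d with
  | nil => rfl
  | cons r rs ih =>
    have hstep := step_eq_modify d r
    simp only [List.foldl_cons, List.filterMap_cons]
    cases h : pvSuffix r with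
    | none =>
      rw [h] at hstep
      simp only [hstep, Option.map_none]
      exact ih d
    | some s =>
      rw [h] at hstep
      simp only [hstep, Option.map_some, List.foldl_cons]
      exact ih (d.modify s [] (· ++ [r]))

-- ===== VERDICT (by name: the statement is the Claim_ definition above) =====
theorem get_spines_spec : Claim_equal_get_spines := by
  intro regions _
  unfold Spec_get_spines get_spines get_spines_alt
  rw [fold_eq_tagged]
  set tagged := regions.filterMap (fun r => (pvSuffix r).map (fun s => (s, r))) with htag
  have hnd : (tagged.foldl (fun out p => out.modify p.1 [] (· ++ [p.2]))
      (PySem.Dict.empty : PySem.Dict String (List String))).keys.Nodup := by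
    exact PySem.Dict.nodup_keys_foldl_modify_key tagged (·.1) [] (fun _ p => (· ++ [p.2])) _
      (by simp [PySem.Dict.keys_empty])
  rw [PySem.Dict.items_eq_map_keys _ hnd []]
  rw [PySem.Dict.keys_foldl_modify_key]
  simp only [PySem.Dict.keys_empty, PySem.Set.update_nil_left, PySem.List.dedup_eq_ofList]
  refine List.map_congr_left (fun k _ => ?_)
  rw [PySem.Dict.getD_foldl_modify_append]
  simp [PySem.Dict.getD_empty]
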